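-- pv_equiv track=rewrite | github.com/leeminHong1990/JianLiMJ | scripts/common/utility.py | getPairNum
-- ===== SOURCE A (Python) =====
-- def getTile2NumDict(tiles):
-- 	tile2NumDict = {}
-- 	for t in tiles:
-- 		if t not in tile2NumDict:
-- 			tile2NumDict[t] = 1
-- 		else:
-- 			tile2NumDict[t] += 1
-- 	return tile2NumDict
--
-- def getPairNum(tiles, isContainTriple = False, isContainKong = False):
-- 	num = 0
-- 	tile2NumDict = getTile2NumDict(tiles)
-- 	for tile in tile2NumDict:
-- 		if tile2NumDict[tile] == 2:
-- 			num += 1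
-- 		elif tile2NumDict[tile] == 3 and isContainTriple:
-- 			num += 1
-- 		elif tile2NumDict[tile] == 4 and isContainKong:
-- 			num += 2
-- 	return num
-- ===== SOURCE B (Python) =====
-- def getPairNum(tiles, isContainTriple = False, isContainKong = False):
-- 	s = sorted(tiles)
-- 	num = 0
-- 	i = 0
-- 	while i < len(s):
-- 		j = pvRunEnd(s, s[i], i + 1)
-- 		c = j - i
-- 		if c == 2:
-- 			num += 1
-- 		elif c == 3 and isContainTriple:
-- 			num += 1
-- 		elif c == 4 and isContainKong:
-- 			num += 2
-- 		i = j
-- 	return num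
--
-- def pvRunEnd(s, t, j):
-- 	while j < len(s) and s[j] == t:
-- 		j += 1
-- 	return j
-- ===== Notes on version B (the rewrite author's own statement) =====
-- stated objective: alternative
-- what changed: B uses no dictionary at all: it sorts the tiles so equal tiles become contiguous, then scans the sorted list run by run, measuring each run's length with an inner scan and scoring it, whereas A builds a tile-to-count dict in one pass and then loops over its keys.
import Mathlib
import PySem

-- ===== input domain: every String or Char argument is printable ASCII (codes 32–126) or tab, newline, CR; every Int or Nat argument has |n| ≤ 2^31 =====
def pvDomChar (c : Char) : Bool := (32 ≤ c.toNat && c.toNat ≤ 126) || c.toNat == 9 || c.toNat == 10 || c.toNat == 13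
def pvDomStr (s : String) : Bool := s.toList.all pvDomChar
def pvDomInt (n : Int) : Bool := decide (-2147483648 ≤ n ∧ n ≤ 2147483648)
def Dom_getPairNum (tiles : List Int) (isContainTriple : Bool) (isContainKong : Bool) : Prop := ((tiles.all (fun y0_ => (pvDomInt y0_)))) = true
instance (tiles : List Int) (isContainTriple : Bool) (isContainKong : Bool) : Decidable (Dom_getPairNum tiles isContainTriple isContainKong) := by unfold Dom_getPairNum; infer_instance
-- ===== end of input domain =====

-- B drops A's dict entirely: it sorts the tiles and scores each contiguous run of equal tiles by its length.


-- ===== PORT A =====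
def getTile2NumDict (tiles : List Int) : PySem.Dict Int Int :=
  tiles.foldl (fun d t =>
    if ¬ (d.contains t) then d.insert t 1
    else d.insert t (d.getD t 0 + 1)) PySem.Dict.empty

def getPairNum (tiles : List Int) (isContainTriple : Bool) (isContainKong : Bool) : Int :=
  let tile2NumDict := getTile2NumDict tiles
  tile2NumDict.keys.foldl (fun num tile =>
    if tile2NumDict.getD tile 0 == 2 then num + 1
    else if tile2NumDict.getD tile 0 == 3 && isContainTriple then num + 1
    else if tile2NumDict.getD tile 0 == 4 && isContainKong then num + 2
    else num) 0

-- ===== PORT B =====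
-- inner 'while c < len(rest) and rest[c] == t: c += 1' of Source B; the index c is a Nat (it starts at 0
-- and only grows), and rest[c] is read with getD, exact here because the guard keeps c in range
def pvRunLen (rest : List Int) (t : Int) (c : Nat) : Nat :=
  if c < rest.length then
    if rest.getD c 0 == t then pvRunLen rest t (c + 1) else c
  else c
termination_by rest.length - c

-- termination fact for the outer loop: the run-length scan never moves the index backwards
theorem pvRunLen_ge (rest : List Int) (t : Int) (c : Nat) : c ≤ pvRunLen rest t c := by
  induction c using pvRunLen.induct rest t with
  | case1 c hlt heq ih => rw [pvRunLen, if_pos hlt, if_pos heq]; omega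
  | case2 c hlt hne => rw [pvRunLen, if_pos hlt, if_neg hne]
  | case3 c hge => rw [pvRunLen, if_neg hge]

-- outer 'while i < len(s):' of Source B; i, j, c are Nats (they start at 0 and only grow; j ≥ i + 1
-- always holds by pvRunLen_ge, so the Nat subtraction j - i equals Python's j - i)
def pvScanFrom (s : List Int) (isContainTriple : Bool) (isContainKong : Bool) (i : Nat) (num : Int) : Int :=
  if h : i < s.length then
    let j := pvRunLen s (s.getD i 0) (i + 1)
    let c := j - i
    let num' :=
      if c == 2 then num + 1
      else if c == 3 && isContainTriple then num + 1
      else if c == 4 && isContainKong then num + 2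
      else num
    pvScanFrom s isContainTriple isContainKong j num'
  else num
termination_by s.length - i
decreasing_by
  have := pvRunLen_ge s (s.getD i 0) (i + 1)
  omega

def getPairNum_alt (tiles : List Int) (isContainTriple : Bool) (isContainKong : Bool) : Int :=
  pvScanFrom (PySem.List.sorted tiles (fun x => x) false) isContainTriple isContainKong 0 0

-- ===== PRECONDITION & SPEC =====
def Spec_getPairNum (tiles : List Int) (isContainTriple : Bool) (isContainKong : Bool) (out : Int) : Prop := out = getPairNum_alt tiles isContainTriple isContainKong
instance (tiles : List Int) (isContainTriple : Bool) (isContainKong : Bool) (out : Int) : Decidable (Spec_getPairNum tiles isContainTriple isContainKong out) := by unfold Spec_getPairNum; infer_instance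

-- ===== CLAIM (what is proved, stated in full; the proofs are below) =====
def Claim_equal_getPairNum : Prop := ∀ (tiles : List Int) (isContainTriple : Bool) (isContainKong : Bool), Dom_getPairNum tiles isContainTriple isContainKong → Spec_getPairNum tiles isContainTriple isContainKong (getPairNum tiles isContainTriple isContainKong)

-- ===== LEMMAS AND PROOFS =====

-- score of one tile kind with multiplicity c (proof-only helper; both programs inline these branches)
def pvScore (T K : Bool) (c : Int) : Int :=
  if c == 2 then 1 else if c == 3 && T then 1 else if c == 4 && K then 2 else 0

-- A's dict-building step equals PySem's counter (getD default 0 makes the missing-key branch coincide)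
theorem tileDict_eq_counter (tiles : List Int) :
    getTile2NumDict tiles = PySem.Dict.counter tiles := by
  rw [← PySem.Dict.foldl_insert_getD_add_one_eq_counter]
  unfold getTile2NumDict
  congr 1
  funext d t
  by_cases h : d.contains t
  · simp [h]
  · have hc : d.contains t = false := by simpa using h
    simp [h, PySem.Dict.getD_of_not_contains d 0 hc]

-- A's scoring fold over a key list, as a sum of per-key scores
theorem foldl_score (ks : List Int) (g : Int → Int) (T K : Bool) (n : Int) :
    ks.foldl (fun num k =>
      if g k == 2 then num + 1
      else if g k == 3 && T then num + 1
      else if g k == 4 && K then num + 2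
      else num) n
    = n + (ks.map (fun k => pvScore T K (g k))).sum := by
  induction ks generalizing n with
  | nil => simp
  | cons k ks ih =>
    simp only [List.foldl_cons, List.map_cons, List.sum_cons, ih, pvScore]
    split_ifs <;> ring

-- A in closed form: sum of scores over the distinct tiles (first occurrences), multiplicity = count
theorem getPairNum_closed (tiles : List Int) (T K : Bool) :
    getPairNum tiles T K
      = ((PySem.List.dedup tiles).map (fun k => pvScore T K (tiles.count k : Int))).sum := by
  unfold getPairNum
  dsimp only
  rw [tileDict_eq_counter, foldl_score]
  rw [PySem.Dict.keys_counter, ← PySem.List.dedup_eq_ofList]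
  simp [PySem.Dict.getD_counter]

-- the inner index scan measures the length of the leading run of t's past position c
theorem pvRunLen_eq_takeWhile (rest : List Int) (t : Int) (c : Nat) :
    pvRunLen rest t c = c + ((rest.drop c).takeWhile (fun x => x == t)).length := by
  induction c using pvRunLen.induct rest t with
  | case1 c hlt heq ih =>
    rw [pvRunLen, if_pos hlt, if_pos heq, ih]
    rw [List.drop_eq_getElem_cons hlt, List.takeWhile_cons]
    have hgd : rest[c] = rest.getD c 0 := (List.getD_eq_getElem rest 0 hlt).symm
    rw [hgd, if_pos heq]
    simp
    omega
  | case2 c hlt hne =>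
    rw [pvRunLen, if_pos hlt, if_neg hne]
    rw [List.drop_eq_getElem_cons hlt, List.takeWhile_cons]
    have hgd : rest[c] = rest.getD c 0 := (List.getD_eq_getElem rest 0 hlt).symm
    rw [hgd, if_neg hne]
    simp
  | case3 c hge =>
    rw [pvRunLen, if_neg hge]
    rw [List.drop_eq_nil_of_le (by omega)]
    simp

-- in a sorted list whose elements are all ≥ t, the leading ==t run is exactly the t's,
-- and what follows it is exactly the elements ≠ t
theorem run_facts (l : List Int) (t : Int) (hp : l.Pairwise (· ≤ ·)) (hall : ∀ x ∈ l, t ≤ x) :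
    ((l.takeWhile (fun x => x == t)).length = l.count t)
      ∧ (l.dropWhile (fun x => x == t) = l.filter (fun x => x != t)) := by
  induction l with
  | nil => simp
  | cons x xs ih =>
    rcases List.pairwise_cons.mp hp with ⟨hx, hxs⟩
    by_cases hxt : x = t
    · subst hxt
      have hall' : ∀ y ∈ xs, x ≤ y := hx
      rcases ih hxs hall' with ⟨h1, h2⟩
      simp [List.count_cons, h1, h2]
    · have hlt : t < x := lt_of_le_of_ne (hall x (by simp)) (fun h => hxt h.symm)
      have hnot : t ∉ x :: xs := by
        intro hm
        rcases List.mem_cons.mp hm with h | h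
        · exact hxt h.symm
        · exact absurd (hx t h) (by omega)
      constructor
      · rw [List.count_eq_zero_of_not_mem hnot]
        simp [List.takeWhile_cons, hxt]
      · rw [List.dropWhile_cons_of_neg (by simp [hxt]), List.filter_eq_self.mpr]
        intro a ha
        simp only [bne_iff_ne, ne_eq]
        intro h; subst h
        exact hnot ha
-- the branch ladder on a Nat run length agrees with pvScore of its Int cast
theorem score_step (T K : Bool) (num S : Int) (m : Nat) :
    (if m == 2 then num + 1
      else if m == 3 && T then num + 1
      else if m == 4 && K then num + 2
      else num) + S
      = num + (pvScore T K (m : Int) + S) := by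
  have e2 : ((m : Int) == 2) = (m == 2) := by by_cases h : m = 2 <;> simp [h] <;> omega
  have e3 : ((m : Int) == 3) = (m == 3) := by by_cases h : m = 3 <;> simp [h] <;> omega
  have e4 : ((m : Int) == 4) = (m == 4) := by by_cases h : m = 4 <;> simp [h] <;> omega
  simp only [pvScore, e2, e3, e4]
  split_ifs <;> ring

-- stripping one tile kind from the front: the distinct-tiles list refactors as a permutation
theorem dedup_cons_perm (t : Int) (r : List Int) :
    (PySem.List.dedup (t :: r)).Perm (t :: PySem.List.dedup (r.filter (fun x => x != t))) := by
  rw [List.perm_ext_iff_of_nodup (PySem.List.nodup_dedup _)]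
  · intro a
    simp only [PySem.List.mem_dedup, List.mem_cons, List.mem_filter, bne_iff_ne, ne_eq]
    by_cases h : a = t <;> simp [h]
  · refine List.Nodup.cons ?_ (PySem.List.nodup_dedup _)
    simp [List.mem_filter]

-- the index drop of the length of a takeWhile prefix is the dropWhile suffix
theorem drop_takeWhile_length (p : Int → Bool) (l : List Int) :
    l.drop (l.takeWhile p).length = l.dropWhile p := by
  induction l with
  | nil => simp
  | cons y ys ihy =>
    by_cases hy : p y = true <;> simp [List.dropWhile_cons, hy, ihy]

-- B's outer loop on any sorted list, in the same closed form as A: from position i it adds the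
-- scores of the runs of s.drop i, i.e. of the distinct remaining tiles weighted by their counts
theorem pvScanFrom_closed (T K : Bool) : ∀ (n : Nat) (s : List Int), s.Pairwise (· ≤ ·) →
    ∀ (i : Nat), s.length - i ≤ n → ∀ (num : Int),
    pvScanFrom s T K i num
      = num + ((PySem.List.dedup (s.drop i)).map
          (fun k => pvScore T K ((s.drop i).count k : Int))).sum := by
  intro n
  induction n with
  | zero =>
    intro s _ i hlen num
    rw [pvScanFrom, dif_neg (by omega)]
    rw [List.drop_eq_nil_of_le (by omega)]
    simp [PySem.List.dedup]
  | succ n ihn =>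
    intro s hp i hlen num
    by_cases hi : i < s.length
    · rw [pvScanFrom, dif_pos hi]
      have hgd : s.getD i 0 = s[i] := List.getD_eq_getElem s 0 hi
      have hdropi : s.drop i = s[i] :: s.drop (i + 1) := List.drop_eq_getElem_cons hi
      have hj : pvRunLen s (s.getD i 0) (i + 1)
          = (i + 1) + ((s.drop (i + 1)).takeWhile (fun x => x == s[i])).length := by
        rw [hgd, pvRunLen_eq_takeWhile]
      have hpd : (s.drop i).Pairwise (· ≤ ·) := hp.sublist (List.drop_sublist i s)
      have hall : ∀ x ∈ s.drop i, s[i] ≤ x := by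
        rw [hdropi]
        intro x hx
        rcases List.mem_cons.mp hx with h | h
        · omega
        · rw [hdropi] at hpd
          exact (List.pairwise_cons.mp hpd).1 x h
      rcases run_facts (s.drop i) s[i] hpd hall with ⟨hcnt, hdw⟩
      -- the run length c is the count of s[i] in the remaining suffix
      have htw : ((s.drop i).takeWhile (fun x => x == s[i]))
          = s[i] :: ((s.drop (i + 1)).takeWhile (fun x => x == s[i])) := by
        rw [hdropi, List.takeWhile_cons, if_pos (by simp)]
      have hc : pvRunLen s (s.getD i 0) (i + 1) - i = (s.drop i).count s[i] := by
        rw [hj, ← hcnt, htw]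
        simp
        omega
      -- the next position j jumps exactly over that run
      have hdropj : s.drop (pvRunLen s (s.getD i 0) (i + 1))
          = (s.drop (i + 1)).filter (fun x => x != s[i]) := by
        rw [hj, ← List.drop_drop, drop_takeWhile_length]
        have h1 : (s.drop i).dropWhile (fun x => x == s[i])
            = (s.drop (i + 1)).dropWhile (fun x => x == s[i]) := by
          rw [hdropi, List.dropWhile_cons, if_pos (by simp)]
        have h2 : (s.drop i).filter (fun x => x != s[i])
            = (s.drop (i + 1)).filter (fun x => x != s[i]) := by
          rw [hdropi, List.filter_cons]
          simp
        rw [← h1, hdw, h2]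
      have hlenj : s.length - pvRunLen s (s.getD i 0) (i + 1) ≤ n := by
        have := pvRunLen_ge s (s.getD i 0) (i + 1)
        omega
      rw [ihn s hp _ hlenj, hdropj]
      -- reassemble: the scored run plus the remaining suffix, via the dedup decomposition
      have hperm2 : (PySem.List.dedup (s.drop i)).Perm
          (s[i] :: PySem.List.dedup ((s.drop (i + 1)).filter (fun x => x != s[i]))) := by
        rw [hdropi]
        exact dedup_cons_perm s[i] (s.drop (i + 1))
      have hperm := hperm2.map (fun k => pvScore T K (((s.drop i).count k : Nat) : Int))
      rw [hperm.sum_eq, List.map_cons, List.sum_cons]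
      have hmaps :
          ((PySem.List.dedup ((s.drop (i + 1)).filter (fun x => x != s[i]))).map
              (fun k => pvScore T K ((((s.drop (i + 1)).filter (fun x => x != s[i])).count k : Nat) : Int)))
            = ((PySem.List.dedup ((s.drop (i + 1)).filter (fun x => x != s[i]))).map
              (fun k => pvScore T K (((s.drop i).count k : Nat) : Int))) := by
        apply List.map_congr_left
        intro k hk
        rw [PySem.List.mem_dedup] at hk
        have hkt : (k != s[i]) = true := (List.mem_filter.mp hk).2
        have hne : k ≠ s[i] := by simpa using hkt
        have hcf : ((s.drop (i + 1)).filter (fun x => x != s[i])).count k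
            = (s.drop (i + 1)).count k := by
          rw [List.count_eq_countP, List.countP_filter, List.count_eq_countP]
          congr 1
          funext x
          by_cases hx : x = k <;> simp [hx, hkt]
        rw [hcf, hdropi, List.count_cons]
        simp [Ne.symm hne]
      rw [hmaps, hc]
      exact score_step T K num _ _
    · rw [pvScanFrom, dif_neg hi]
      rw [List.drop_eq_nil_of_le (by omega)]
      simp [PySem.List.dedup]

-- the closed forms agree: sorting changes neither the distinct tiles (as a set) nor their counts
theorem sorted_sum_eq (tiles : List Int) (T K : Bool) :
    ((PySem.List.dedup (PySem.List.sorted tiles (fun x => x) false)).map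
        (fun k => pvScore T K ((PySem.List.sorted tiles (fun x => x) false).count k : Int))).sum
      = ((PySem.List.dedup tiles).map (fun k => pvScore T K (tiles.count k : Int))).sum := by
  have hperm : (PySem.List.sorted tiles (fun x => x) false).Perm tiles :=
    PySem.List.sorted_perm tiles (fun x => x) false
  have hcnt : ∀ k : Int, (PySem.List.sorted tiles (fun x => x) false).count k = tiles.count k :=
    fun k => hperm.count_eq k
  have h1 :
      ((PySem.List.dedup (PySem.List.sorted tiles (fun x => x) false)).map
          (fun k => pvScore T K ((PySem.List.sorted tiles (fun x => x) false).count k : Int)))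
        = ((PySem.List.dedup (PySem.List.sorted tiles (fun x => x) false)).map
          (fun k => pvScore T K (tiles.count k : Int))) := by
    apply List.map_congr_left
    intro k _
    rw [hcnt k]
  rw [h1]
  have hdperm : (PySem.List.dedup (PySem.List.sorted tiles (fun x => x) false)).Perm
      (PySem.List.dedup tiles) := by
    rw [List.perm_ext_iff_of_nodup (PySem.List.nodup_dedup _) (PySem.List.nodup_dedup _)]
    intro a
    rw [PySem.List.mem_dedup, PySem.List.mem_dedup, PySem.List.mem_sorted]
  exact (hdperm.map _).sum_eq

-- ===== VERDICT (by name: the statement is the Claim_ definition above) =====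
theorem getPairNum_spec : Claim_equal_getPairNum := by
  intro tiles T K _
  unfold Spec_getPairNum getPairNum_alt
  rw [pvScanFrom_closed T K (PySem.List.sorted tiles (fun x => x) false).length _
    (by simpa using PySem.List.sorted_pairwise tiles (fun x => x)) 0 (by omega)]
  simp only [List.drop_zero]
  rw [getPairNum_closed, sorted_sum_eq]
  ring
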